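-- pv_equiv track=rewrite | github.com/robertmaxwilliams/indefinitely-scalable | prepro.py | grid_to_code
-- ===== SOURCE A (Python) =====
-- import itertools
--
-- def pos_part(n):
--     if n > 0:
--         return n
--     return 0
--
-- def neg_part(n):
--     if n < 0:
--         return abs(n)
--     return 0
--
-- def chainer(di, dj):
--     return ''.join(['->right'*pos_part(dj),
--                     '->left'*neg_part(dj),
--                     '->up'*neg_part(di),
--                     '->down'*pos_part(di)])
--
-- def third(ls):
--     return ls[2]
--
-- def grid_to_code(letters):
--     code = []
--     declarations = []
--     for _, group_iter in itertools.groupby(sorted(letters,key=third), key=third):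
--         group = list(group_iter)
--         if len(group) == 1:
--             (i, j, c) = group[0]
--             declarations.append(f'cell_t* {c};')
--             code.append(f'{c} = cell{chainer(i, j)};')
--         else:
--             var_name = group[0][2]
--             declarations.append(f'cell_t* {var_name};')
--             code.append(f'switch(rand() % {len(group)})' + ' {')
--             for (n, (i, j, c)) in enumerate(group):
--                 code.append(f'\tcase {n}: {c} = cell{chainer(i, j)}; break;')
--             code.append('}')
--     return code, declarations
-- ===== SOURCE B (Python) =====
-- def pos_part(n):
--     if n > 0:
--         return n
--     return 0
--
-- def neg_part(n):
--     if n < 0: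
--         return abs(n)
--     return 0
--
-- def chainer(di, dj):
--     return ''.join(['->right'*pos_part(dj),
--                     '->left'*neg_part(dj),
--                     '->up'*neg_part(di),
--                     '->down'*pos_part(di)])
--
-- def grid_to_code(letters):
--     groups = {}
--     for (i, j, c) in letters:
--         groups.setdefault(c, []).append((i, j, c))
--     code = []
--     declarations = []
--     for name in sorted(groups):
--         group = groups[name]
--         declarations.append(f'cell_t* {name};')
--         if len(group) == 1:
--             (i, j, c) = group[0]
--             code.append(f'{c} = cell{chainer(i, j)};')
--         else:
--             code.append(f'switch(rand() % {len(group)})' + ' {')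
--             for n, (i, j, c) in enumerate(group):
--                 code.append(f'\tcase {n}: {c} = cell{chainer(i, j)}; break;')
--             code.append('}')
--     return code, declarations
-- ===== Notes on version B (the rewrite author's own statement) =====
-- stated objective: idiomatic
-- what changed: B replaces A's sort-the-whole-list + itertools.groupby pass by building a dict-of-lists index keyed on the letter in one scan and then emitting groups in sorted-key order.
import Mathlib
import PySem

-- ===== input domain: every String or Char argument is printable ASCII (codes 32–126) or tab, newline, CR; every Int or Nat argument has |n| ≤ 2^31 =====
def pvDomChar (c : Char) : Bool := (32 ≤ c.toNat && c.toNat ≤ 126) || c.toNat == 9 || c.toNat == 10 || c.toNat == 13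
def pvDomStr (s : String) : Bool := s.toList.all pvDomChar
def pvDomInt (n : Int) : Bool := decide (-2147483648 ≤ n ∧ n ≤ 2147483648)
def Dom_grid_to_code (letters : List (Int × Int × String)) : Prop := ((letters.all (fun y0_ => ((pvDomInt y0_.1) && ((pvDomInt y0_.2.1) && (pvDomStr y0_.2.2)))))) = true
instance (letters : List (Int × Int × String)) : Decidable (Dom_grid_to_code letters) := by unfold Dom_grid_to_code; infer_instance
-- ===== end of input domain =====

-- B replaces A's sort+itertools.groupby pass by a dict-of-lists index built in one scan, then an ordered scan over sorted keys (same emission logic, byte-identical output).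

-- shared same-module helpers (identical in Source A and Source B)
def pos_part (n : Int) : Int := if n > 0 then n else 0

def neg_part (n : Int) : Int := if n < 0 then |n| else 0

-- Python 's * n' for a string and int (empty for n ≤ 0); exact on this domain
def strRepeat (s : String) (n : Int) : String := String.join (List.replicate n.toNat s)

def chainer (di dj : Int) : String :=
  String.join [strRepeat "->right" (pos_part dj),
               strRepeat "->left" (neg_part dj),
               strRepeat "->up" (neg_part di),
               strRepeat "->down" (pos_part di)]

def third (t : Int × Int × String) : String := t.2.2

-- ===== PORT A =====
-- itertools.groupby(·, key=third) over an already key-sorted list: maximal runs of equal key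
def groupRuns : List (Int × Int × String) → List (List (Int × Int × String))
  | [] => []
  | x :: xs =>
    (x :: xs.takeWhile (fun y => third y == third x)) ::
      groupRuns (xs.dropWhile (fun y => third y == third x))
termination_by l => l.length
decreasing_by
  have := List.length_dropWhile_le (fun y => third y == third x) xs
  simp only [List.length_cons]
  omega

-- the loop body of A (appends to (code, declarations))
def emitA (cd : List String × List String) (group : List (Int × Int × String)) :
    List String × List String :=
  if group.length = 1 then
    match group with
    | (i, j, c) :: _ =>
      (cd.1 ++ [c ++ " = cell" ++ chainer i j ++ ";"], cd.2 ++ ["cell_t* " ++ c ++ ";"])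
    | [] => cd
  else
    match group with
    | [] => cd
    | (_, _, var_name) :: _ =>
      let cd1 : List String × List String :=
        (cd.1 ++ ["switch(rand() % " ++ PySem.Int.toStr (group.length : Int) ++ ") {"],
         cd.2 ++ ["cell_t* " ++ var_name ++ ";"])
      let cd2 := (PySem.List.enumerate group).foldl
        (fun cd' p =>
          (cd'.1 ++ ["\tcase " ++ PySem.Int.toStr p.1 ++ ": " ++ p.2.2.2 ++ " = cell" ++
                     chainer p.2.1 p.2.2.1 ++ "; break;"], cd'.2)) cd1
      (cd2.1 ++ ["}"], cd2.2)

def grid_to_code (letters : List (Int × Int × String)) : List String × List String :=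
  (groupRuns (PySem.List.sorted letters third false)).foldl emitA ([], [])

-- ===== PORT B =====
-- groups.setdefault(c, []).append((i, j, c))
def buildGroups (letters : List (Int × Int × String)) :
    PySem.Dict String (List (Int × Int × String)) :=
  letters.foldl (fun d t => d.modify t.2.2 [] (fun g => g ++ [t])) PySem.Dict.empty

-- the loop body of B (declaration from the key, then the same single/switch emission)
def emitB (cd : List String × List String) (name : String)
    (group : List (Int × Int × String)) : List String × List String :=
  let cd0 : List String × List String := (cd.1, cd.2 ++ ["cell_t* " ++ name ++ ";"])
  if group.length = 1 then
    match group with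
    | (i, j, c) :: _ => (cd0.1 ++ [c ++ " = cell" ++ chainer i j ++ ";"], cd0.2)
    | [] => cd0
  else
    match group with
    | [] => cd0
    | _ :: _ =>
      let cd1 : List String × List String :=
        (cd0.1 ++ ["switch(rand() % " ++ PySem.Int.toStr (group.length : Int) ++ ") {"], cd0.2)
      let cd2 := (PySem.List.enumerate group).foldl
        (fun cd' p =>
          (cd'.1 ++ ["\tcase " ++ PySem.Int.toStr p.1 ++ ": " ++ p.2.2.2 ++ " = cell" ++
                     chainer p.2.1 p.2.2.1 ++ "; break;"], cd'.2)) cd1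
      (cd2.1 ++ ["}"], cd2.2)

def grid_to_code_alt (letters : List (Int × Int × String)) : List String × List String :=
  let d := buildGroups letters
  (PySem.List.sorted d.keys (fun k => k) false).foldl
    (fun cd k => emitB cd k (d.getD k [])) ([], [])

-- ===== PRECONDITION & SPEC =====
def Spec_grid_to_code (letters : List (Int × Int × String)) (out : List String × List String) : Prop := out = grid_to_code_alt letters
instance (letters : List (Int × Int × String)) (out : List String × List String) : Decidable (Spec_grid_to_code letters out) := by unfold Spec_grid_to_code; infer_instance

-- ===== CLAIM (what is proved, stated in full; the proofs are below) =====
def Claim_equal_grid_to_code : Prop := ∀ (letters : List (Int × Int × String)), Dom_grid_to_code letters → Spec_grid_to_code letters (grid_to_code letters)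

-- ===== LEMMAS AND PROOFS =====

-- B's dict group for key k is the filter of letters, in order
theorem getD_buildGroups (letters : List (Int × Int × String)) (k : String) :
    (buildGroups letters).getD k [] = letters.filter (fun t => t.2.2 == k) := by
  have h : letters.foldl (fun d t => d.modify t.2.2 [] (fun g => g ++ [t])) PySem.Dict.empty
      = (letters.map (fun t => (t.2.2, t))).foldl
          (fun d p => d.modify p.1 [] (fun g => g ++ [p.2])) PySem.Dict.empty := by
    rw [List.foldl_map]
  rw [buildGroups, h, PySem.Dict.getD_foldl_modify_append, List.filter_map, List.map_map]
  simp [Function.comp_def]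

-- B's dict keys are the distinct thirds in first-occurrence order
theorem keys_buildGroups (letters : List (Int × Int × String)) :
    (buildGroups letters).keys = PySem.List.dedup (letters.map (fun t => t.2.2)) := by
  rw [buildGroups,
    PySem.Dict.keys_foldl_modify_key letters (fun t => t.2.2) [] (fun _ t => fun g => g ++ [t])]
  simp [PySem.List.dedup, PySem.Set.ofList, PySem.Set.update, PySem.Dict.empty, PySem.Dict.keys,
    PySem.Set.empty]

theorem update_sublist {α : Type} [BEq α] (bs : List α) (s : List α) :
    (PySem.Set.update s bs : List α).Sublist (s ++ bs) := by
  induction bs generalizing s with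
  | nil => simp [PySem.Set.update]
  | cons b bs ih =>
    have h1 : (PySem.Set.update (PySem.Set.add s b) bs : List α).Sublist
        (PySem.Set.add s b ++ bs) := ih _
    have h2 : (PySem.Set.add s b : List α).Sublist (s ++ [b]) := by
      unfold PySem.Set.add
      split <;> simp
    have e : PySem.Set.update s (b :: bs) = PySem.Set.update (PySem.Set.add s b) bs := by
      simp [PySem.Set.update]
    rw [e]
    simpa [List.append_assoc] using h1.trans (h2.append_right bs)

theorem dedup_sublist {α : Type} [BEq α] (xs : List α) :
    (PySem.List.dedup xs).Sublist xs := by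
  have := update_sublist xs ([] : List α)
  simpa [PySem.List.dedup, PySem.Set.ofList, PySem.Set.update, PySem.Set.empty] using this

-- inserting x into a key-sorted list: the filter at key k gains x at the END iff x has key k
theorem filter_insertBy (x : Int × Int × String) (ys : List (Int × Int × String)) (k : String)
    (h : ys.Pairwise (fun a b => a.2.2 ≤ b.2.2)) :
    (PySem.List.insertBy (fun a b => decide (a.2.2 < b.2.2)) x ys).filter (fun t => t.2.2 == k)
      = if x.2.2 == k then ys.filter (fun t => t.2.2 == k) ++ [x]
        else ys.filter (fun t => t.2.2 == k) := by
  induction ys with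
  | nil => simp [PySem.List.insertBy]; split <;> simp_all
  | cons y ys ih =>
    rw [List.pairwise_cons] at h
    by_cases hb : x.2.2 < y.2.2
    · have hins : PySem.List.insertBy (fun a b => decide (a.2.2 < b.2.2)) x (y :: ys)
          = x :: y :: ys := by
        simp [PySem.List.insertBy, hb]
      rw [hins]
      by_cases hk : x.2.2 = k
      · have hnone : (y :: ys).filter (fun t => t.2.2 == k) = [] := by
          rw [List.filter_eq_nil_iff]
          intro z hz
          have : x.2.2 < z.2.2 := by
            rcases List.mem_cons.mp hz with rfl | hz'
            · exact hb
            · exact lt_of_lt_of_le hb (h.1 z hz')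
          simp [← hk]
          exact fun e => absurd e.symm (ne_of_lt this)
        simp [hk, hnone]
      · simp [List.filter_cons, hk]
    · have hins : PySem.List.insertBy (fun a b => decide (a.2.2 < b.2.2)) x (y :: ys)
          = y :: PySem.List.insertBy (fun a b => decide (a.2.2 < b.2.2)) x ys := by
        simp [PySem.List.insertBy, hb]
      rw [hins, List.filter_cons, ih h.2, List.filter_cons]
      by_cases hk : x.2.2 == k <;> by_cases hy : y.2.2 == k <;> simp [hk, hy]

-- stability of Python's sort: filtering one key commutes with sorting by that key
theorem filter_sorted (letters : List (Int × Int × String)) (k : String) :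
    (PySem.List.sorted letters third false).filter (fun t => t.2.2 == k)
      = letters.filter (fun t => t.2.2 == k) := by
  induction letters using List.reverseRecOn with
  | nil => simp [PySem.List.sorted]
  | append_singleton l x ih =>
    have hs : PySem.List.sorted (l ++ [x]) third false
        = PySem.List.insertBy (fun a b => decide (third a < third b)) x
            (PySem.List.sorted l third false) := by
      rw [PySem.List.sorted_eq_foldl_insertBy, PySem.List.sorted_eq_foldl_insertBy,
        List.foldl_append]
      simp
    have hp : (PySem.List.sorted l third false).Pairwise (fun a b => a.2.2 ≤ b.2.2) :=
      PySem.List.sorted_pairwise l third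
    rw [hs]
    have := filter_insertBy x (PySem.List.sorted l third false) k hp
    simp only [third] at this ⊢
    refine this.trans ?_
    rw [ih, List.filter_append]
    by_cases hk : x.2.2 == k <;> simp [hk]

theorem set_update_of_mem {α : Type} [BEq α] [LawfulBEq α] (as : List α) (s : PySem.Set α)
    (h : ∀ a ∈ as, a ∈ (s : List α)) : PySem.Set.update s as = s := by
  induction as generalizing s with
  | nil => rfl
  | cons a as ih =>
    have ha : PySem.Set.add s a = s := by
      unfold PySem.Set.add
      have : a ∈ (s : List α) := h a (List.mem_cons_self ..)
      simp [this]
    show PySem.Set.update (PySem.Set.add s a) as = s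
    rw [ha]
    exact ih _ (fun b hb => h b (List.mem_cons_of_mem _ hb))

theorem set_update_context {α : Type} [BEq α] [LawfulBEq α] (bs : List α) (t s : List α)
    (h : ∀ b ∈ bs, b ∉ t) :
    (PySem.Set.update (t ++ s) bs : List α) = t ++ PySem.Set.update s bs := by
  induction bs generalizing s with
  | nil => rfl
  | cons b bs ih =>
    have hadd : PySem.Set.add (t ++ s : List α) b = (t ++ PySem.Set.add s b : List α) := by
      unfold PySem.Set.add
      have hbt : b ∉ t := h b (List.mem_cons_self ..)
      by_cases hbs : b ∈ (s : List α)
      · simp [hbt, hbs]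
      · simp [hbt, hbs, List.append_assoc]
    show (PySem.Set.update (PySem.Set.add (t ++ s) b) bs : List α) = _
    rw [hadd]
    exact ih _ (fun c hc => h c (List.mem_cons_of_mem _ hc))

-- dedup of a run-structured key list: the head key followed by the dedup of the tail keys
theorem dedup_cons_runs (x : Int × Int × String) (run rest : List (Int × Int × String))
    (hrun : ∀ y ∈ run, y.2.2 = x.2.2) (hrest : ∀ y ∈ rest, y.2.2 ≠ x.2.2) :
    PySem.List.dedup ((x :: (run ++ rest)).map (fun t => t.2.2))
      = x.2.2 :: PySem.List.dedup (rest.map (fun t => t.2.2)) := by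
  simp only [List.map_cons, List.map_append, PySem.List.dedup, PySem.Set.ofList]
  rw [List.foldl_cons, List.foldl_append]
  have h0 : PySem.Set.add PySem.Set.empty x.2.2 = ([x.2.2] : List String) := rfl
  rw [h0]
  have h1 : List.foldl PySem.Set.add ([x.2.2] : List String) (run.map (fun t => t.2.2))
      = [x.2.2] := by
    apply set_update_of_mem
    intro a ha
    rcases List.mem_map.mp ha with ⟨y, hy, rfl⟩
    simp [hrun y hy]
  rw [h1]
  have h2 : (PySem.Set.update (([x.2.2] ++ [] : List String)) (rest.map (fun t => t.2.2))
        : List String)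
      = [x.2.2] ++ PySem.Set.update ([] : List String) (rest.map (fun t => t.2.2)) := by
    apply set_update_context
    intro b hb
    rcases List.mem_map.mp hb with ⟨y, hy, rfl⟩
    simp [hrest y hy]
  simpa [PySem.Set.update, PySem.Set.empty] using h2

-- all elements surviving the dropWhile have key strictly above x's
theorem rest_keys (c : String) : ∀ (xs : List (Int × Int × String))
    (_ : ∀ y ∈ xs, c ≤ y.2.2) (_ : xs.Pairwise (fun a b => a.2.2 ≤ b.2.2)),
    ∀ y ∈ xs.dropWhile (fun y => y.2.2 == c), c < y.2.2 := by
  intro xs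
  induction xs with
  | nil => intro _ _ y hy; simp at hy
  | cons a as ih =>
    intro hx hpw y hy
    rw [List.pairwise_cons] at hpw
    by_cases hpa : a.2.2 = c
    · rw [List.dropWhile_cons_of_pos (by simp [hpa])] at hy
      exact ih (fun z hz => hx z (List.mem_cons_of_mem _ hz)) hpw.2 y hy
    · rw [List.dropWhile_cons_of_neg (by simp [hpa])] at hy
      have hca : c < a.2.2 := lt_of_le_of_ne (hx a (List.mem_cons_self ..)) (Ne.symm hpa)
      rcases List.mem_cons.mp hy with rfl | hy'
      · exact hca
      · exact lt_of_lt_of_le hca (hpw.1 y hy')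

-- groupby over a key-sorted list = the per-distinct-key filters
theorem groupRuns_eq (l : List (Int × Int × String))
    (hp : l.Pairwise (fun a b => a.2.2 ≤ b.2.2)) :
    groupRuns l = (PySem.List.dedup (l.map (fun t => t.2.2))).map
      (fun k => l.filter (fun t => t.2.2 == k)) := by
  induction l using groupRuns.induct with
  | case1 => simp [groupRuns, PySem.List.dedup, PySem.Set.ofList]
  | case2 x xs ih =>
    rw [List.pairwise_cons] at hp
    set p := fun y : Int × Int × String => third y == third x with hpdef
    set run := xs.takeWhile p with hrundef
    set rest := xs.dropWhile p with hrestdef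
    have hxs : run ++ rest = xs := List.takeWhile_append_dropWhile
    have hrun : ∀ y ∈ run, y.2.2 = x.2.2 := by
      intro y hy
      have := List.mem_takeWhile_imp hy
      simpa [hpdef, third] using this
    have hrest : ∀ y ∈ rest, x.2.2 < y.2.2 := by
      have := rest_keys x.2.2 xs hp.1 hp.2
      simpa [third] using this
    have hrest' : ∀ y ∈ rest, y.2.2 ≠ x.2.2 := fun y hy => (ne_of_gt (hrest y hy))
    have hd : PySem.List.dedup ((x :: xs).map (fun t => t.2.2))
        = x.2.2 :: PySem.List.dedup (rest.map (fun t => t.2.2)) := by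
      conv_lhs => rw [← hxs]
      exact dedup_cons_runs x run rest hrun hrest'
    have hfilt : (x :: xs).filter (fun t => t.2.2 == x.2.2) = x :: run := by
      rw [List.filter_cons_of_pos (by simp), ← hxs, List.filter_append]
      have h1 : run.filter (fun t => t.2.2 == x.2.2) = run :=
        List.filter_eq_self.mpr (fun y hy => by simp [hrun y hy])
      have h2 : rest.filter (fun t => t.2.2 == x.2.2) = [] :=
        List.filter_eq_nil_iff.mpr (fun y hy => by simp [hrest' y hy])
      rw [h1, h2, List.append_nil]
    have hfilt2 : ∀ k ∈ PySem.List.dedup (rest.map (fun t => t.2.2)),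
        (x :: xs).filter (fun t => t.2.2 == k) = rest.filter (fun t => t.2.2 == k) := by
      intro k hk
      rcases List.mem_map.mp ((PySem.List.mem_dedup _ _).mp hk) with ⟨y, hy, rfl⟩
      have hkc : x.2.2 ≠ y.2.2 := ne_of_lt (hrest y hy)
      rw [List.filter_cons_of_neg (by simp [hkc]), ← hxs, List.filter_append]
      have h1 : run.filter (fun t => t.2.2 == y.2.2) = [] :=
        List.filter_eq_nil_iff.mpr (fun z hz => by simp [hrun z hz, hkc])
      rw [h1, List.nil_append]
    have hpw_rest : rest.Pairwise (fun a b => a.2.2 ≤ b.2.2) :=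
      hp.2.sublist (List.dropWhile_sublist _)
    rw [groupRuns, hd, List.map_cons, ← hrundef, ← hrestdef, hfilt]
    congr 1
    · rw [ih hpw_rest]
      exact List.map_congr_left (fun k hk => (hfilt2 k hk).symm)

-- the inner case-emitting fold only touches the code component
theorem foldl_snd_const (l : List (Int × Int × String)) (a : List String) (b : List String)
    (n : Int) :
    (PySem.List.enumerate l n).foldl
        (fun cd' p =>
          (cd'.1 ++ ["\tcase " ++ PySem.Int.toStr p.1 ++ ": " ++ p.2.2.2 ++ " = cell" ++
                     chainer p.2.1 p.2.2.1 ++ "; break;"], cd'.2)) (a, b)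
      = ((PySem.List.enumerate l n).foldl
          (fun c p => c ++ ["\tcase " ++ PySem.Int.toStr p.1 ++ ": " ++ p.2.2.2 ++ " = cell" ++
                     chainer p.2.1 p.2.2.1 ++ "; break;"]) a, b) := by
  induction l generalizing a n with
  | nil => simp [PySem.List.enumerate]
  | cons x xs ih => simp [PySem.List.enumerate, ih]

-- both loop bodies agree on a nonempty group whose members all carry key k
theorem emitA_eq_emitB (cd : List String × List String) (k : String)
    (g : List (Int × Int × String)) (hne : g ≠ []) (hk : ∀ t ∈ g, t.2.2 = k) :
    emitA cd g = emitB cd k g := by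
  match g, hne with
  | (i, j, c) :: rest, _ =>
    have hc : c = k := hk (i, j, c) (List.mem_cons_self ..)
    by_cases h1 : ((i, j, c) :: rest).length = 1
    · simp [emitA, emitB, hc]
    · simp only [emitA, emitB, h1, if_false]
      rw [foldl_snd_const, foldl_snd_const]
      simp [hc]

-- B's sorted key list is exactly the distinct keys of the sorted input, in order
theorem keys_sorted_eq (letters : List (Int × Int × String)) :
    PySem.List.sorted (buildGroups letters).keys (fun k : String => k) false
      = PySem.List.dedup ((PySem.List.sorted letters third false).map (fun t => t.2.2)) := by
  rw [keys_buildGroups]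
  set s := PySem.List.sorted letters third false with hs
  have hperm : (PySem.List.dedup (letters.map (fun t => t.2.2))).Perm
      (PySem.List.dedup (s.map (fun t => t.2.2))) := by
    rw [List.perm_ext_iff_of_nodup (PySem.List.nodup_dedup _) (PySem.List.nodup_dedup _)]
    intro a
    rw [PySem.List.mem_dedup, PySem.List.mem_dedup]
    exact ⟨fun h => ((PySem.List.sorted_perm letters third false).map _).mem_iff.mpr h,
           fun h => ((PySem.List.sorted_perm letters third false).map _).mem_iff.mp h⟩
  have h1 : PySem.List.sorted (PySem.List.dedup (letters.map (fun t => t.2.2)))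
        (fun k : String => k) false
      = PySem.List.sorted (PySem.List.dedup (s.map (fun t => t.2.2)))
        (fun k : String => k) false :=
    PySem.List.sorted_eq_sorted_of_perm _ _ _ (fun a b h => h) hperm
  have hpw : (PySem.List.dedup (s.map (fun t => t.2.2))).Pairwise
      (fun a b : String => a ≤ b) := by
    have h2 : (s.map (fun t => t.2.2)).Pairwise (fun a b : String => a ≤ b) :=
      PySem.List.sorted_map_key_pairwise letters third
    exact h2.sublist (dedup_sublist _)
  rw [h1, PySem.List.sorted_eq_self_of_pairwise _ _ hpw]

-- ===== VERDICT (by name: the statement is the Claim_ definition above) =====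
theorem grid_to_code_spec : Claim_equal_grid_to_code := by
  intro letters _
  unfold Spec_grid_to_code grid_to_code grid_to_code_alt
  show _ = List.foldl (fun cd k => emitB cd k ((buildGroups letters).getD k [])) ([], [])
      (PySem.List.sorted (buildGroups letters).keys (fun k => k) false)
  set s := PySem.List.sorted letters third false with hs
  have hp : s.Pairwise (fun a b => a.2.2 ≤ b.2.2) := PySem.List.sorted_pairwise letters third
  rw [groupRuns_eq s hp, List.foldl_map, keys_sorted_eq]
  apply PySem.List.foldl_congr_mem
  intro acc k hk
  rcases List.mem_map.mp ((PySem.List.mem_dedup _ _).mp hk) with ⟨y, hy, rfl⟩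
  have hgetD := getD_buildGroups letters y.2.2
  have hfs := filter_sorted letters y.2.2
  rw [hgetD, ← hfs]
  apply emitA_eq_emitB
  · intro hnil
    have : y ∈ s.filter (fun t => t.2.2 == y.2.2) := List.mem_filter.mpr ⟨hy, by simp⟩
    rw [hnil] at this
    simp at this
  · intro t ht
    simpa using (List.mem_filter.mp ht).2
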